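-- pv_equiv track=rewrite | github.com/michaeltg12/ADC_Reproc_Toolbox | apm/commands/process.py | get_facility
-- ===== SOURCE A (Python) =====
-- def get_facility(process):
--     ''' Parse the facility from the process name '''
--     facility = []
--     for i in range(len(process) -1, -1, -1):
--         try:
--             int(process[i])
--             facility.append(process[i])
--             continue
--         except ValueError as e:
--             facility.append(process[i])
--             break
--         except Exception as e:
--             raise e
--     facility.reverse()
--     return ''.join(facility)
-- ===== SOURCE B (Python) =====
-- def get_facility(process):
--     ''' Parse the facility from the process name '''
--     stripped = process.rstrip('0123456789')
--     return process[max(len(stripped) - 1, 0):]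
-- ===== Notes on version B (the rewrite author's own statement) =====
-- stated objective: idiomatic
-- what changed: Replaces the reverse-scanning try/except character-appending loop (append digits, append one boundary char, reverse, join) with a direct rstrip of trailing digits followed by a single slice from one character before the digit run.
import Mathlib
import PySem

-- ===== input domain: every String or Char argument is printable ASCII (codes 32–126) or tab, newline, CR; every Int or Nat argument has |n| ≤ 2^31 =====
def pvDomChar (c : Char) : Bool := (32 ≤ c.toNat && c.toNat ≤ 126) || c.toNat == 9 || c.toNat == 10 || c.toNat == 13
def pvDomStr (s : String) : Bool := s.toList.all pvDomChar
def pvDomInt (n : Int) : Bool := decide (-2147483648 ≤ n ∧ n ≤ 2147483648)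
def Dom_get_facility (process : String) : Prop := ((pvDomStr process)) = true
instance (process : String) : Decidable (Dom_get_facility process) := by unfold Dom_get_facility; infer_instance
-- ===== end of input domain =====

-- B replaces A's reverse-scanning try/except append/reverse/join loop by an rstrip of trailing digits plus one slice (idiomatic, same cost).

-- ===== PORT A =====
-- the loop 'for i in range(len(process)-1, -1, -1)' with break, transcribed over the index list;
-- int(process[i]) succeeding = PySem.Int.ofStr? returning some
def get_facility_go (s : List Char) (idxs : List Int) (facility : List Char) : List Char :=
  match idxs with
  | [] => facility
  | i :: rest =>
    match PySem.List.pyGet? s i with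
    | none => facility  -- unreachable: range indices are in bounds
    | some c =>
      if (PySem.Int.ofStr? (String.ofList [c])).isSome then
        get_facility_go s rest (facility ++ [c])   -- int() succeeded: append, continue
      else
        facility ++ [c]                            -- ValueError: append, break

def get_facility (process : String) : String :=
  let facility := get_facility_go process.toList
    (PySem.List.pyRange ((process.toList.length : Int) - 1) (-1) (-1)) []
  String.ofList facility.reverse   -- facility.reverse(); ''.join(facility)

-- ===== PORT B =====
def get_facility_alt (process : String) : String :=
  -- process.rstrip('0123456789') ported by hand (reverse / dropWhile member-of-chars / reverse): exact
  let stripped := (process.toList.reverse.dropWhile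
    (fun c => ("0123456789".toList).contains c)).reverse
  PySem.Str.slice process (some (max ((stripped.length : Int) - 1) 0)) none

-- ===== PRECONDITION & SPEC =====
def Spec_get_facility (process : String) (out : String) : Prop := out = get_facility_alt process
instance (process : String) (out : String) : Decidable (Spec_get_facility process out) := by unfold Spec_get_facility; infer_instance

-- ===== CLAIM (what is proved, stated in full; the proofs are below) =====
def Claim_equal_get_facility : Prop := ∀ (process : String), Dom_get_facility process → Spec_get_facility process (get_facility process)

-- ===== LEMMAS AND PROOFS =====

-- on the ASCII domain, int() succeeds on a single char exactly on '0'..'9'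
theorem digit_ofStr (c : Char) (h : pvDomChar c = true) :
    (PySem.Int.ofStr? (String.ofList [c])).isSome = (("0123456789".toList).contains c) := by
  have hlt : c.toNat < 127 := by
    unfold pvDomChar at h; simp at h; omega
  have key : ∀ n : Nat, n < 127 →
      ((PySem.Int.ofStr? (String.ofList [Char.ofNat n])).isSome
        = (("0123456789".toList).contains (Char.ofNat n))) := by decide
  have := key c.toNat hlt
  rwa [Char.ofNat_toNat] at this

-- A's loop on the first m characters collects the trailing digit run of (s.take m).reverse plus one boundary char
theorem loop_spec (s : List Char) (hd : ∀ c ∈ s, pvDomChar c = true)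
    (m : Nat) (hm : m ≤ s.length) (acc : List Char) :
    get_facility_go s (PySem.List.pyRange ((m : Int) - 1) (-1) (-1)) acc
    = acc ++ (((s.take m).reverse.takeWhile (fun c => ("0123456789".toList).contains c))
        ++ (((s.take m).reverse.dropWhile (fun c => ("0123456789".toList).contains c)).take 1)) := by
  induction m generalizing acc with
  | zero =>
    rw [PySem.List.pyRange_neg_one_eq_nil (by norm_num)]
    simp [get_facility_go]
  | succ m ih =>
    have hm' : m < s.length := by omega
    have hcons : PySem.List.pyRange (((m + 1 : Nat) : Int) - 1) (-1) (-1)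
        = (m : Int) :: PySem.List.pyRange ((m : Int) - 1) (-1) (-1) := by
      push_cast
      rw [PySem.List.pyRange_neg_one_cons (by omega)]
      ring_nf
    rw [hcons]
    have hget : PySem.List.pyGet? s ((m : Int)) = some s[m] := by
      simp [hm']
    have htake : (s.take (m+1)).reverse = s[m] :: (s.take m).reverse := by
      rw [List.take_add_one]
      simp [hm']
    have hdig := digit_ofStr s[m] (hd _ (List.getElem_mem hm'))
    unfold get_facility_go
    rw [hget]
    simp only
    rw [htake]
    by_cases hD : (("0123456789".toList).contains s[m]) = true
    · rw [hdig, hD]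
      simp only [if_true]
      rw [ih (by omega)]
      simp only [List.takeWhile_cons, List.dropWhile_cons, hD, if_true,
        List.append_assoc, List.cons_append, List.nil_append]
    · rw [hdig]
      have hD' : (("0123456789".toList).contains s[m]) = false :=
        Bool.eq_false_iff.mpr (fun h => hD h)
      simp only [hD', Bool.false_eq_true, if_false]
      simp only [List.takeWhile_cons, List.dropWhile_cons, hD', Bool.false_eq_true, if_false,
        List.nil_append, List.take_succ_cons, List.take_zero]

-- B's drop-from-the-computed-index equals the same decomposition (stated for rev, then specialised)
theorem drop_rev (p : Char → Bool) (rev : List Char) :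
    rev.reverse.drop (max ((((rev.dropWhile p).reverse).length : Int) - 1) 0).toNat
    = ((rev.takeWhile p) ++ ((rev.dropWhile p).take 1)).reverse := by
  rcases ht : rev.dropWhile p with _ | ⟨x, t'⟩
  · have h2 : rev.takeWhile p = rev := by
      conv_rhs => rw [← List.takeWhile_append_dropWhile (p := p) (l := rev)]
      rw [ht, List.append_nil]
    simp [h2]
  · have hrev : rev = rev.takeWhile p ++ (x :: t') := by
      conv_lhs => rw [← List.takeWhile_append_dropWhile (p := p) (l := rev)]
      rw [ht]
    have hmax : (max (((x :: t').reverse.length : Int) - 1) 0).toNat = t'.length := by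
      simp
    rw [hmax]
    conv_lhs => rw [hrev]
    rw [List.reverse_append, List.reverse_cons, List.append_assoc,
      List.drop_left' (by simp)]
    simp

theorem drop_spec (s : List Char) :
    s.drop (max ((((s.reverse.dropWhile (fun c => ("0123456789".toList).contains c)).reverse).length : Int) - 1) 0).toNat
    = ((s.reverse.takeWhile (fun c => ("0123456789".toList).contains c))
        ++ ((s.reverse.dropWhile (fun c => ("0123456789".toList).contains c)).take 1)).reverse := by
  have := drop_rev (fun c => ("0123456789".toList).contains c) s.reverse
  rwa [List.reverse_reverse] at this

theorem main_eq (process : String) (h : pvDomStr process = true) :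
    get_facility process = get_facility_alt process := by
  have hd : ∀ c ∈ process.toList, pvDomChar c = true := by
    simpa [pvDomStr, List.all_eq_true] using h
  unfold get_facility get_facility_alt
  simp only
  rw [loop_spec process.toList hd process.toList.length le_rfl []]
  rw [List.take_length, List.nil_append]
  have hk : (0:Int) ≤ max (((((process.toList.reverse.dropWhile (fun c => ("0123456789".toList).contains c)).reverse).length : Int)) - 1) 0 := le_max_right _ _
  have halt : (PySem.Str.slice process (some (max ((((process.toList.reverse.dropWhile (fun c => ("0123456789".toList).contains c)).reverse).length : Int) - 1) 0)) none).toList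
      = process.toList.drop (max ((((process.toList.reverse.dropWhile (fun c => ("0123456789".toList).contains c)).reverse).length : Int) - 1) 0).toNat := by
    rw [PySem.Str.toList_slice, PySem.Chars.slice_eq_listSlice, PySem.List.slice_from _ hk]
  rw [drop_spec process.toList] at halt
  calc String.ofList ((List.takeWhile (fun c => ("0123456789".toList).contains c) process.toList.reverse ++
        List.take 1 (List.dropWhile (fun c => ("0123456789".toList).contains c) process.toList.reverse)).reverse)
      = String.ofList ((PySem.Str.slice process (some (max ((((process.toList.reverse.dropWhile (fun c => ("0123456789".toList).contains c)).reverse).length : Int) - 1) 0)) none).toList) := by rw [halt]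
    _ = _ := String.ofList_toList

-- ===== VERDICT (by name: the statement is the Claim_ definition above) =====
theorem get_facility_spec : Claim_equal_get_facility := by
  intro process hDom
  unfold Spec_get_facility
  exact main_eq process hDom
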